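-- pv_equiv track=rewrite | github.com/ahmedhosssam/competitive-programming | c.py | maximize_product
-- ===== SOURCE A (Python) =====
-- def maximize_product(x, y):
--     # Convert integers to lists of digits
--     x_digits = [int(d) for d in str(x)]
--     y_digits = [int(d) for d in str(y)]
--
--     # Sort digits in non-decreasing order for x and non-increasing order for y
--     x_digits.sort()
--     y_digits.sort(reverse=True)
--
--     # Convert lists of digits back to integers
--     x_maximized = int(''.join(map(str, x_digits)))
--     y_maximized = int(''.join(map(str, y_digits)))
--
--     return x_maximized, y_maximized
-- ===== SOURCE B (Python) =====
-- def maximize_product(x, y):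
--     # Counting sort over the digit characters: one frequency table per number,
--     # rebuilt ascending for x and descending for y.
--     cnt_x = [0] * 10
--     for ch in str(x):
--         cnt_x[int(ch)] += 1
--     cnt_y = [0] * 10
--     for ch in str(y):
--         cnt_y[int(ch)] += 1
--     x_s = ''.join(str(d) * cnt_x[d] for d in range(10))
--     y_s = ''.join(str(d) * cnt_y[d] for d in range(9, -1, -1))
--     return int(x_s), int(y_s)
-- ===== Notes on version B (the rewrite author's own statement) =====
-- stated objective: alternative
-- what changed: Replaces the comparison-based .sort() of the digit lists by a counting sort: a 10-entry frequency table is filled from the digit characters and the result strings are reconstructed by emitting each digit count[d] times, ascending for x and descending for y.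
import Mathlib
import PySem

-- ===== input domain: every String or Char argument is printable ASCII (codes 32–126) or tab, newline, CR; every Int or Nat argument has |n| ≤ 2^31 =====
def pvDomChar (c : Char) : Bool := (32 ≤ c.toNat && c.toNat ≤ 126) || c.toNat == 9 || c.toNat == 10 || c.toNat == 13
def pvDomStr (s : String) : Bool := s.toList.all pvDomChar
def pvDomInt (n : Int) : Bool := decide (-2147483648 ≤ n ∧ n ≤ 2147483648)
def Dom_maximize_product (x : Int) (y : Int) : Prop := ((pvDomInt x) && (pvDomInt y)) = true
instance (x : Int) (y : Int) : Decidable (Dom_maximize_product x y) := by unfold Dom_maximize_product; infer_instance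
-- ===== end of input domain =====

-- B replaces the comparison-based digit sort by a counting sort over a 10-entry
-- frequency table (alternative algorithm).

-- ===== PORT A =====
-- int(d) for a one-character string d (ValueError → none; the 0 default is never
-- reached under Pre_, where every character is a decimal digit)
def pvDigitInt (c : Char) : Int := (PySem.Int.ofChars? [c]).getD 0

def maximize_product (x : Int) (y : Int) : Int × Int :=
  let x_digits := (PySem.Int.toChars x).map pvDigitInt
  let y_digits := (PySem.Int.toChars y).map pvDigitInt
  let x_sorted := PySem.List.sorted x_digits (fun v => v) false
  let y_sorted := PySem.List.sorted y_digits (fun v => v) true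
  let x_maximized := (PySem.Int.ofChars? (x_sorted.flatMap PySem.Int.toChars)).getD 0
  let y_maximized := (PySem.Int.ofChars? (y_sorted.flatMap PySem.Int.toChars)).getD 0
  (x_maximized, y_maximized)

-- ===== PORT B =====
-- cnt = [0]*10; for ch in str(n): cnt[int(ch)] += 1
def pvCountDigits (s : List Char) : List Int :=
  s.foldl
    (fun cnt ch =>
      PySem.List.pySetD cnt (pvDigitInt ch) (PySem.List.pyGetD cnt (pvDigitInt ch) 0 + 1))
    (List.replicate 10 0)

def maximize_product_alt (x : Int) (y : Int) : Int × Int :=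
  let cnt_x := pvCountDigits (PySem.Int.toChars x)
  let cnt_y := pvCountDigits (PySem.Int.toChars y)
  let x_s := (PySem.List.pyRange 0 10 1).flatMap
    (fun d => PySem.List.pyRepeat (PySem.Int.toChars d) (PySem.List.pyGetD cnt_x d 0))
  let y_s := (PySem.List.pyRange 9 (-1) (-1)).flatMap
    (fun d => PySem.List.pyRepeat (PySem.Int.toChars d) (PySem.List.pyGetD cnt_y d 0))
  ((PySem.Int.ofChars? x_s).getD 0, (PySem.Int.ofChars? y_s).getD 0)

-- ===== PRECONDITION & SPEC =====
-- Pre_ excludes negative x or y, on which A raises ValueError (int('-') on the sign character).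
def Pre_maximize_product (x : Int) (y : Int) : Prop := 0 ≤ x ∧ 0 ≤ y
instance (x : Int) (y : Int) : Decidable (Pre_maximize_product x y) := by
  unfold Pre_maximize_product; infer_instance

def pvWitness_maximize_product : Int × Int := (201, 530)

def Spec_maximize_product (x : Int) (y : Int) (out : Int × Int) : Prop := out = maximize_product_alt x y
instance (x : Int) (y : Int) (out : Int × Int) : Decidable (Spec_maximize_product x y out) := by unfold Spec_maximize_product; infer_instance

-- ===== CLAIM (what is proved, stated in full; the proofs are below) =====
def Claim_equal_maximize_product : Prop := ∀ (x : Int) (y : Int), Dom_maximize_product x y → Pre_maximize_product x y → Spec_maximize_product x y (maximize_product x y)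

-- ===== LEMMAS AND PROOFS =====

theorem pv_flatMap_congr {α β : Type} {l : List α} {f g : α → List β}
    (h : ∀ x ∈ l, f x = g x) : l.flatMap f = l.flatMap g := by
  induction l with
  | nil => rfl
  | cons a l ih =>
    simp only [List.flatMap_cons]
    rw [h a (List.mem_cons_self ..), ih (fun x hx => h x (List.mem_cons_of_mem _ hx))]

theorem pv_flatMap_assoc {α β γ : Type} (l : List α) (f : α → List β) (g : β → List γ) :
    (l.flatMap f).flatMap g = l.flatMap (fun x => (f x).flatMap g) := by
  induction l with
  | nil => rfl
  | cons a l ih => simp only [List.flatMap_cons, List.flatMap_append, ih]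

-- every character produced by Nat.toDigitsCore with base 10 is a decimal digit character
theorem pv_mem_toDigitsCore (fuel n : Nat) (ds : List Char) :
    ∀ c ∈ Nat.toDigitsCore 10 fuel n ds, c ∈ ds ∨ ∃ k, k < 10 ∧ c = Nat.digitChar k := by
  induction fuel generalizing n ds with
  | zero => intro c hc; exact Or.inl hc
  | succ fuel ih =>
    intro c hc
    simp only [Nat.toDigitsCore] at hc
    split at hc
    · rcases List.mem_cons.1 hc with h | h
      · exact Or.inr ⟨n % 10, Nat.mod_lt _ (by norm_num), h⟩
      · exact Or.inl h
    · rcases ih _ _ c hc with h | h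
      · rcases List.mem_cons.1 h with h' | h'
        · exact Or.inr ⟨n % 10, Nat.mod_lt _ (by norm_num), h'⟩
        · exact Or.inl h'
      · exact Or.inr h

theorem pv_mem_toChars (n : Int) (h : 0 ≤ n) :
    ∀ c ∈ PySem.Int.toChars n, ∃ k, k < 10 ∧ c = Nat.digitChar k := by
  intro c hc
  unfold PySem.Int.toChars at hc
  rw [if_neg (by omega)] at hc
  rcases pv_mem_toDigitsCore _ _ _ c hc with h' | h'
  · simp at h'
  · exact h'

theorem pvDigitInt_digitChar : ∀ k : Nat, k < 10 → pvDigitInt (Nat.digitChar k) = (k : Int) := by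
  decide

theorem pv_toChars_digit : ∀ k : Nat, k < 10 → PySem.Int.toChars (k : Int) = [Nat.digitChar k] := by
  decide

theorem pv_toChars_small (d : Int) (h0 : 0 ≤ d) (h10 : d < 10) :
    PySem.Int.toChars d = [Nat.digitChar d.toNat] := by
  have h : d = ((d.toNat : Nat) : Int) := by omega
  rw [h]
  exact pv_toChars_digit d.toNat (by omega)

-- ascending counting-sort reconstruction over the values 0 … n-1
def pvAsc (f : Int → Nat) (n : Int) : List Int :=
  (PySem.List.pyRange 0 n 1).flatMap (fun d => List.replicate (f d) d)

theorem pvAsc_succ (f : Int → Nat) (n : Int) (hn : 0 ≤ n) :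
    pvAsc f (n + 1) = pvAsc f n ++ List.replicate (f n) n := by
  unfold pvAsc
  rw [PySem.List.pyRange_one_succ_right hn, List.flatMap_append]
  simp

theorem pvAsc_count (f : Int → Nat) (n : Int) (hn : 0 ≤ n) (e : Int) :
    (pvAsc f n).count e = if 0 ≤ e ∧ e < n then f e else 0 := by
  induction n, hn using Int.le_induction with
  | base =>
    rw [if_neg (by omega)]
    unfold pvAsc
    rw [PySem.List.pyRange_one_eq_nil (le_refl 0)]
    rfl
  | succ n hn ih =>
    rw [pvAsc_succ f n hn, List.count_append, ih, List.count_replicate]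
    by_cases he : e = n
    · subst he
      rw [if_neg (by omega : ¬ (0 ≤ e ∧ e < e)), if_pos (by omega : 0 ≤ e ∧ e < e + 1)]
      simp
    · rw [if_neg (by simpa using fun hh => he hh.symm : ¬ ((n == e) = true))]
      by_cases hh : 0 ≤ e ∧ e < n
      · rw [if_pos hh, if_pos (by omega), add_zero]
      · rw [if_neg hh, if_neg (by omega), add_zero]

theorem pvAsc_mem (f : Int → Nat) (n : Int) (a : Int) (ha : a ∈ pvAsc f n) :
    0 ≤ a ∧ a < n := by
  unfold pvAsc at ha
  rw [List.mem_flatMap] at ha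
  obtain ⟨k, hk, hmem⟩ := ha
  have hb := PySem.List.mem_pyRange_one.1 hk
  rw [List.mem_replicate] at hmem
  obtain ⟨-, rfl⟩ := hmem
  exact hb

theorem pvAsc_pairwise (f : Int → Nat) (n : Int) (hn : 0 ≤ n) :
    (pvAsc f n).Pairwise (fun a b => a ≤ b) := by
  induction n, hn using Int.le_induction with
  | base =>
    unfold pvAsc
    rw [PySem.List.pyRange_one_eq_nil (le_refl 0)]
    exact List.Pairwise.nil
  | succ n hn ih =>
    rw [pvAsc_succ f n hn]
    refine List.pairwise_append.2 ⟨ih, List.pairwise_replicate.2 ?_, ?_⟩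
    · right; exact le_refl _
    · intro a ha b hb
      have h1 := pvAsc_mem f n a ha
      have h2 := List.eq_of_mem_replicate hb
      subst h2
      omega

theorem pv_sorted_asc (L : List Int) (h : ∀ v ∈ L, 0 ≤ v ∧ v < 10) :
    PySem.List.sorted L (fun v => v) false = pvAsc (fun d => L.count d) 10 := by
  apply List.eq_of_perm_of_sorted (le := fun a b : Int => a ≤ b)
  · intro a b _ _ h1 h2; omega
  · simpa using PySem.List.sorted_pairwise L (fun v => v)
  · exact pvAsc_pairwise _ 10 (by norm_num)
  · refine List.perm_iff_count.2 ?_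
    intro e
    rw [List.Perm.count_eq (PySem.List.sorted_perm L (fun v => v) false)]
    rw [pvAsc_count _ 10 (by norm_num)]
    split_ifs with he
    · rfl
    · exact List.count_eq_zero.2 (fun hmem => he (h e hmem))

theorem pv_sorted_desc (L : List Int) (h : ∀ v ∈ L, 0 ≤ v ∧ v < 10) :
    PySem.List.sorted L (fun v => v) true = (pvAsc (fun d => L.count d) 10).reverse := by
  apply List.eq_of_perm_of_sorted (le := fun a b : Int => b ≤ a)
  · intro a b _ _ h1 h2; omega
  · simpa using PySem.List.sorted_pairwise_rev L (fun v => v)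
  · rw [List.pairwise_reverse]
    exact pvAsc_pairwise _ 10 (by norm_num)
  · refine (PySem.List.sorted_perm L (fun v => v) true).trans ?_
    have h1 : L.Perm (pvAsc (fun d => L.count d) 10) := by
      rw [← pv_sorted_asc L h]
      exact (PySem.List.sorted_perm L (fun v => v) false).symm
    exact h1.trans (List.reverse_perm _).symm

-- the frequency table computed by B's counting loop
theorem pv_counts_fold (t : List Char) (acc : List Int) (hlen : acc.length = 10)
    (ht : ∀ c ∈ t, ∃ k, k < 10 ∧ c = Nat.digitChar k) (d : Int) (hd0 : 0 ≤ d) (hd10 : d < 10) :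
    PySem.List.pyGetD
      (t.foldl (fun cnt ch =>
        PySem.List.pySetD cnt (pvDigitInt ch) (PySem.List.pyGetD cnt (pvDigitInt ch) 0 + 1)) acc)
      d 0
    = PySem.List.pyGetD acc d 0 + ((t.map pvDigitInt).count d : Int) := by
  induction t generalizing acc with
  | nil => simp
  | cons c t ih =>
    obtain ⟨k, hk, rfl⟩ := ht _ (List.mem_cons_self ..)
    have hv : pvDigitInt (Nat.digitChar k) = (k : Int) := pvDigitInt_digitChar k hk
    simp only [List.foldl_cons]
    rw [ih _ (by rw [PySem.List.length_pySetD]; exact hlen)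
         (fun c hc => ht c (List.mem_cons_of_mem _ hc))]
    simp only [List.map_cons, List.count_cons, hv]
    rw [PySem.List.pySetD_of_nonneg _ _ (Int.natCast_nonneg k)]
    rw [PySem.List.pyGetD_of_nonneg _ _ hd0, PySem.List.pyGetD_of_nonneg _ _ hd0,
        PySem.List.pyGetD_of_nonneg _ _ (Int.natCast_nonneg k)]
    simp only [List.getD_eq_getElem?_getD, List.getElem?_set, hlen]
    by_cases hkd : (k : Int) = d
    · have h1 : (k:Int).toNat = d.toNat := by omega
      have h2 : (((k:Int) == d) = true) := by simpa using hkd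
      have h3 : d.toNat < 10 := by omega
      simp only [h1, if_true, h3, Option.getD_some]
      push_cast
      rw [if_pos h2]
      omega
    · have h1 : ¬ ((k:Int).toNat = d.toNat) := by omega
      have h2 : ¬ (((k:Int) == d) = true) := by simpa using hkd
      simp only [h1, if_false]
      push_cast
      rw [if_neg h2]
      omega

theorem pv_counts_getD (s : List Char)
    (hs : ∀ c ∈ s, ∃ k, k < 10 ∧ c = Nat.digitChar k) (d : Int) (hd0 : 0 ≤ d) (hd10 : d < 10) :
    PySem.List.pyGetD (pvCountDigits s) d 0 = ((s.map pvDigitInt).count d : Int) := by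
  unfold pvCountDigits
  rw [pv_counts_fold s (List.replicate 10 0) (by simp) hs d hd0 hd10]
  rw [PySem.List.pyGetD_of_nonneg _ _ hd0]
  rw [List.getD_eq_getElem?_getD, List.getElem?_replicate]
  split_ifs <;> simp

theorem pv_flatMap_replicate {α β : Type} (m : Nat) (a : α) (g : α → List β) (b : β)
    (h : g a = [b]) : (List.replicate m a).flatMap g = List.replicate m b := by
  induction m with
  | zero => rfl
  | succ m ih => simp [List.replicate_succ, List.flatMap_cons, h, ih]

theorem pv_digits_bound (n : Int) (h : 0 ≤ n) :
    ∀ v ∈ (PySem.Int.toChars n).map pvDigitInt, 0 ≤ v ∧ v < 10 := by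
  intro v hv
  obtain ⟨c, hc, rfl⟩ := List.mem_map.1 hv
  obtain ⟨k, hk, rfl⟩ := pv_mem_toChars n h c hc
  rw [pvDigitInt_digitChar k hk]
  constructor
  · omega
  · exact_mod_cast hk

-- A's joined ascending digit string = B's ascending reconstruction (per number)
theorem pv_side_asc (n : Int) (h : 0 ≤ n) :
    (PySem.List.sorted ((PySem.Int.toChars n).map pvDigitInt) (fun v => v) false).flatMap
        PySem.Int.toChars
      = (PySem.List.pyRange 0 10 1).flatMap
          (fun d => PySem.List.pyRepeat (PySem.Int.toChars d)
            (PySem.List.pyGetD (pvCountDigits (PySem.Int.toChars n)) d 0)) := by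
  rw [pv_sorted_asc _ (pv_digits_bound n h)]
  unfold pvAsc
  rw [pv_flatMap_assoc]
  apply pv_flatMap_congr
  intro d hd
  have hb := PySem.List.mem_pyRange_one.1 hd
  rw [pv_flatMap_replicate _ _ _ _ (pv_toChars_small d hb.1 hb.2)]
  rw [pv_counts_getD _ (pv_mem_toChars n h) d hb.1 hb.2]
  rw [pv_toChars_small d hb.1 hb.2, PySem.List.pyRepeat_singleton]
  simp

-- A's joined descending digit string = B's descending reconstruction (per number)
theorem pv_side_desc (n : Int) (h : 0 ≤ n) :
    (PySem.List.sorted ((PySem.Int.toChars n).map pvDigitInt) (fun v => v) true).flatMap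
        PySem.Int.toChars
      = (PySem.List.pyRange 9 (-1) (-1)).flatMap
          (fun d => PySem.List.pyRepeat (PySem.Int.toChars d)
            (PySem.List.pyGetD (pvCountDigits (PySem.Int.toChars n)) d 0)) := by
  rw [pv_sorted_desc _ (pv_digits_bound n h)]
  rw [List.flatMap_reverse]
  have hr : PySem.List.pyRange 9 (-1) (-1) = (PySem.List.pyRange 0 10 1).reverse := by
    rw [PySem.List.pyRange_neg_one_eq_reverse]
    norm_num
  rw [hr, List.flatMap_reverse]
  have hL : (pvAsc (fun d => ((PySem.Int.toChars n).map pvDigitInt).count d) 10).flatMap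
      (List.reverse ∘ PySem.Int.toChars)
      = (pvAsc (fun d => ((PySem.Int.toChars n).map pvDigitInt).count d) 10).flatMap
        PySem.Int.toChars := by
    apply pv_flatMap_congr
    intro v hv
    have hb := pvAsc_mem _ _ _ hv
    simp only [Function.comp]
    rw [pv_toChars_small v hb.1 hb.2]
    rfl
  have hR : (PySem.List.pyRange 0 10 1).flatMap
      (List.reverse ∘ fun d => PySem.List.pyRepeat (PySem.Int.toChars d)
        (PySem.List.pyGetD (pvCountDigits (PySem.Int.toChars n)) d 0))
      = (PySem.List.pyRange 0 10 1).flatMap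
        (fun d => PySem.List.pyRepeat (PySem.Int.toChars d)
          (PySem.List.pyGetD (pvCountDigits (PySem.Int.toChars n)) d 0)) := by
    apply pv_flatMap_congr
    intro d hd
    have hb := PySem.List.mem_pyRange_one.1 hd
    simp only [Function.comp]
    rw [pv_toChars_small d hb.1 hb.2, PySem.List.pyRepeat_singleton, List.reverse_replicate]
  rw [hL, hR]
  rw [← pv_side_asc n h, pv_sorted_asc _ (pv_digits_bound n h)]

-- ===== VERDICT (by name: the statement is the Claim_ definition above) =====
theorem maximize_product_spec : Claim_equal_maximize_product := by
  intro x y _ hpre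
  obtain ⟨hx, hy⟩ := hpre
  unfold Spec_maximize_product maximize_product maximize_product_alt
  simp only []
  rw [pv_side_asc x hx, pv_side_desc y hy]
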